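-- pv_equiv track=rewrite | github.com/LogFlames/nonogram | nonogram_general.py | partial_check_cols
-- ===== SOURCE A (Python) =====
-- def partial_check_cols(rows, cols, grid, to_x, to_y):
--     for i, col in enumerate(cols):
--         if i > to_x:
--             break
--
--         sub_col_index = 0
--         length = 0
--         full_check = True
--         for y in range(len(rows)):
--             if i == to_x and y >= to_y:
--                 full_check = False
--                 break
--
--             if grid[i][y]:
--                 length += 1
--             elif length > 0:
--                 if sub_col_index < len(col) and length == col[sub_col_index]:
--                     sub_col_index += 1
--                 else:
--                     return False
--
--                 length = 0
--
--         if length > 0: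
--             if sub_col_index >= len(col) or \
--                 (length != col[sub_col_index] and full_check or \
--                 length > col[sub_col_index] and not full_check):
--                 return False
--             else:
--                 sub_col_index += 1
--
--         if full_check and sub_col_index != len(col):
--             return False
--
--     return True
-- ===== SOURCE B (Python) =====
-- def partial_check_cols(rows, cols, grid, to_x, to_y):
--     for i, col in enumerate(cols):
--         if i > to_x:
--             break
--         n = min(max(to_y, 0), len(rows)) if i == to_x else len(rows)
--         full = (n == len(rows))
--         runs = []
--         length = 0
--         for cell in grid[i][:n]:
--             if cell:
--                 length += 1
--             elif length > 0:
--                 runs.append(length)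
--                 length = 0
--         clues = list(col)
--         if full:
--             if length > 0:
--                 runs.append(length)
--             if runs != clues:
--                 return False
--         else:
--             if runs != clues[:len(runs)]:
--                 return False
--             if length > 0:
--                 if len(runs) >= len(clues) or length > clues[len(runs)]:
--                     return False
--     return True
-- ===== Notes on version B (the rewrite author's own statement) =====
-- stated objective: simpler
-- what changed: Instead of A's interleaved clue-index bookkeeping (sub_col_index advanced and checked inside the scan, with a compound trailing-run condition), B makes one plain pass per sliced column collecting the completed run lengths into a list and then compares that list to the clues: whole-list equality for a full check, prefix equality plus an open-run upper bound for a partial check.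
-- outside the precondition, e.g. on partial_check_cols([], [[1]], [], 0, 1): A returns False, B raises IndexError; on partial_check_cols([1], [[2], [1]], [[True]], 1, 1): A returns False, B returns False
import Mathlib
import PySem

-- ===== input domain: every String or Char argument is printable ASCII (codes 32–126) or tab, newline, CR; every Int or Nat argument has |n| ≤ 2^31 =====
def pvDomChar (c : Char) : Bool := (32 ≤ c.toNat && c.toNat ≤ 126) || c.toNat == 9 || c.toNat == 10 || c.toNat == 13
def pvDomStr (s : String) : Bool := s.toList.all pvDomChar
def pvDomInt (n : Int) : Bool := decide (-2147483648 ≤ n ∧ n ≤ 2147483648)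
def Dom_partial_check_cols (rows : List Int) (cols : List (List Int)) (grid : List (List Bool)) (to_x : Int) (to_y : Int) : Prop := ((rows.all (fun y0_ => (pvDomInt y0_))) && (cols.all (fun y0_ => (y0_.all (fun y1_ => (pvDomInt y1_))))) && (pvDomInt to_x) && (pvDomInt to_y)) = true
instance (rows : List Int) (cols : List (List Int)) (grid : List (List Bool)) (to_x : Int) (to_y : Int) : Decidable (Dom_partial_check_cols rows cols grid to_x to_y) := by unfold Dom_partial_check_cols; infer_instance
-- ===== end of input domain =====

-- B validates each column by first collecting the completed run lengths in one plain pass and then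
-- comparing that list against the clues (whole list for a full check, prefix plus open-run bound for a
-- partial check), instead of A's interleaved clue-index bookkeeping; same cost, plainer logic.

-- ===== PORT A =====

-- grid[i][y]: both Python programs access it only with 0 ≤ i < len(grid), 0 ≤ y < len(grid[i])
-- (guaranteed by Pre_), where List.getD is exact.
def pvCell (grid : List (List Bool)) (i y : Nat) : Bool := (grid.getD i []).getD y false

-- A's inner `for y in range(len(rows))` loop over the remaining y's, state (sub_col_index, length);
-- `none` = `return False`, `some (s, length, full_check)` = loop left by break (full_check=false) or end.
def pvInnerA (grid : List (List Bool)) (to_x to_y : Int) (i : Nat) (col : List Int) :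
    List Nat → Nat → Int → Option (Nat × Int × Bool)
  | [], s, length => some (s, length, true)
  | y :: ys, s, length =>
    if (i : Int) = to_x ∧ (y : Int) ≥ to_y then some (s, length, false)
    else if pvCell grid i y then pvInnerA grid to_x to_y i col ys s (length + 1)
    else if length > 0 then
      if s < col.length ∧ length = col.getD s 0 then pvInnerA grid to_x to_y i col ys (s + 1) 0
      else none
    else pvInnerA grid to_x to_y i col ys s length

-- A's per-column body after the inner loop: true = fall through to the next column, false = `return False`.
def pvColA (rows : List Int) (grid : List (List Bool)) (to_x to_y : Int) (i : Nat) (col : List Int) : Bool :=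
  match pvInnerA grid to_x to_y i col (List.range rows.length) 0 0 with
  | none => false
  | some (s, length, full) =>
    if length > 0 then
      if s ≥ col.length ∨ (length ≠ col.getD s 0 ∧ full = true) ∨ (length > col.getD s 0 ∧ ¬ full = true)
      then false
      else if full = true ∧ s + 1 ≠ col.length then false else true
    else if full = true ∧ s ≠ col.length then false else true

-- A's outer `for i, col in enumerate(cols)` loop with its `if i > to_x: break`.
def pvOuterA (rows : List Int) (grid : List (List Bool)) (to_x to_y : Int) :
    Nat → List (List Int) → Bool
  | _, [] => true
  | i, col :: rest =>
    if (i : Int) > to_x then true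
    else if pvColA rows grid to_x to_y i col then pvOuterA rows grid to_x to_y (i + 1) rest
    else false

def partial_check_cols (rows : List Int) (cols : List (List Int)) (grid : List (List Bool)) (to_x : Int) (to_y : Int) : Bool :=
  pvOuterA rows grid to_x to_y 0 cols

-- ===== PORT B =====

-- B's run-collecting pass over the cells of the sliced column: state (runs, length).
def pvScanB : List Bool → List Int → Int → List Int × Int
  | [], runs, length => (runs, length)
  | c :: cs, runs, length =>
    if c then pvScanB cs runs (length + 1)
    else if length > 0 then pvScanB cs (runs ++ [length]) 0
    else pvScanB cs runs length

-- B's per-column check; grid[i][:n] with 0 ≤ n is List.take n (Python slices clamp).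
def pvColB (rows : List Int) (grid : List (List Bool)) (to_x to_y : Int) (i : Nat) (col : List Int) : Bool :=
  let n : Nat := if (i : Int) = to_x then min ((max to_y 0).toNat) rows.length else rows.length
  let full : Bool := decide (n = rows.length)
  let rl := pvScanB ((grid.getD i []).take n) [] 0
  if full then
    decide ((if rl.2 > 0 then rl.1 ++ [rl.2] else rl.1) = col)
  else if rl.1 ≠ col.take rl.1.length then false
  else if rl.2 > 0 then
    decide (¬ (rl.1.length ≥ col.length ∨ rl.2 > col.getD rl.1.length 0))
  else true

def pvOuterB (rows : List Int) (grid : List (List Bool)) (to_x to_y : Int) :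
    Nat → List (List Int) → Bool
  | _, [] => true
  | i, col :: rest =>
    if (i : Int) > to_x then true
    else if pvColB rows grid to_x to_y i col then pvOuterB rows grid to_x to_y (i + 1) rest
    else false

def partial_check_cols_alt (rows : List Int) (cols : List (List Int)) (grid : List (List Bool)) (to_x : Int) (to_y : Int) : Bool :=
  pvOuterB rows grid to_x to_y 0 cols

-- ===== PRECONDITION & SPEC =====
-- Pre_ excludes grids missing a reached column or some of its scanned cells: A indexes grid lazily
-- cell by cell (so it can return False, or finish a shorter scan, before a missing cell is touched),
-- while B slices each reached column up front and may raise IndexError on such degenerate grids.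
def Pre_partial_check_cols (rows : List Int) (cols : List (List Int)) (grid : List (List Bool)) (to_x : Int) (to_y : Int) : Prop :=
  ∀ i ∈ List.range cols.length, (i : Int) ≤ to_x →
    i < grid.length ∧
      (if (i : Int) = to_x then min ((max to_y 0).toNat) rows.length else rows.length)
        ≤ (grid.getD i []).length
instance (rows : List Int) (cols : List (List Int)) (grid : List (List Bool)) (to_x : Int) (to_y : Int) : Decidable (Pre_partial_check_cols rows cols grid to_x to_y) := by unfold Pre_partial_check_cols; infer_instance

def pvWitness_partial_check_cols : List Int × List (List Int) × List (List Bool) × Int × Int :=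
  ([1], [[1]], [[true]], 0, 1)

def Spec_partial_check_cols (rows : List Int) (cols : List (List Int)) (grid : List (List Bool)) (to_x : Int) (to_y : Int) (out : Bool) : Prop := out = partial_check_cols_alt rows cols grid to_x to_y
instance (rows : List Int) (cols : List (List Int)) (grid : List (List Bool)) (to_x : Int) (to_y : Int) (out : Bool) : Decidable (Spec_partial_check_cols rows cols grid to_x to_y out) := by unfold Spec_partial_check_cols; infer_instance

-- ===== CLAIM (what is proved, stated in full; the proofs are below) =====
def Claim_equal_partial_check_cols : Prop := ∀ (rows : List Int) (cols : List (List Int)) (grid : List (List Bool)) (to_x : Int) (to_y : Int), Dom_partial_check_cols rows cols grid to_x to_y → Pre_partial_check_cols rows cols grid to_x to_y → Spec_partial_check_cols rows cols grid to_x to_y (partial_check_cols rows cols grid to_x to_y)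

-- ===== LEMMAS AND PROOFS =====

-- closed run lengths / trailing open run length of a scan
def pvClosed (grid : List (List Bool)) (i : Nat) : List Nat → Int → List Int
  | [], _ => []
  | y :: ys, length =>
    if pvCell grid i y then pvClosed grid i ys (length + 1)
    else if length > 0 then length :: pvClosed grid i ys 0
    else pvClosed grid i ys length

def pvOpen (grid : List (List Bool)) (i : Nat) : List Nat → Int → Int
  | [], length => length
  | y :: ys, length =>
    if pvCell grid i y then pvOpen grid i ys (length + 1)
    else if length > 0 then pvOpen grid i ys 0
    else pvOpen grid i ys length

theorem pvScanB_map (grid : List (List Bool)) (i : Nat) (ys : List Nat) :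
    ∀ runs length, pvScanB (ys.map (pvCell grid i)) runs length =
      (runs ++ pvClosed grid i ys length, pvOpen grid i ys length) := by
  induction ys with
  | nil => intro runs length; simp [pvScanB, pvClosed, pvOpen]
  | cons y ys ih =>
    intro runs length
    simp only [List.map_cons, pvScanB, pvClosed, pvOpen]
    split_ifs with h1 h2 <;> simp [ih]

theorem pvTakeMap (l : List Bool) (n : Nat) (h : n ≤ l.length) :
    l.take n = (List.range n).map (fun j => l.getD j false) := by
  apply List.ext_getElem
  · simp
    omega
  · intro j h1 h2
    have hj : j < l.length := by
      simp at h1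
      omega
    simp [List.getElem_take, List.getD_eq_getElem?_getD, List.getElem?_eq_getElem hj]

theorem pvTake_eq_map (grid : List (List Bool)) (i n : Nat)
    (h : n ≤ (grid.getD i []).length) :
    (grid.getD i []).take n = (List.range n).map (pvCell grid i) :=
  pvTakeMap (grid.getD i []) n h

theorem pvOpen_nonneg (grid : List (List Bool)) (i : Nat) (ys : List Nat) :
    ∀ length, 0 ≤ length → 0 ≤ pvOpen grid i ys length := by
  induction ys with
  | nil => intro length h; simpa [pvOpen] using h
  | cons y ys ih =>
    intro length h
    simp only [pvOpen]
    split_ifs with h1 h2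
    · exact ih _ (by omega)
    · exact ih _ (by omega)
    · exact ih _ h

theorem pvInnerA_split (grid : List (List Bool)) (to_x to_y : Int) (i : Nat) (col : List Int)
    (l1 l2 : List Nat) (hnb : ∀ y ∈ l1, ¬ ((i : Int) = to_x ∧ (y : Int) ≥ to_y)) :
    ∀ s length, pvInnerA grid to_x to_y i col (l1 ++ l2) s length =
      if pvClosed grid i l1 length <+: col.drop s
      then pvInnerA grid to_x to_y i col l2 (s + (pvClosed grid i l1 length).length)
            (pvOpen grid i l1 length)
      else none := by
  induction l1 with
  | nil => intro s length; simp [pvClosed, pvOpen]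
  | cons y ys ih =>
    intro s length
    have hy : ¬ ((i : Int) = to_x ∧ (y : Int) ≥ to_y) := hnb y (by simp)
    have hnb' : ∀ y ∈ ys, ¬ ((i : Int) = to_x ∧ (y : Int) ≥ to_y) := fun y hy => hnb y (by simp [hy])
    simp only [List.cons_append, pvInnerA, pvClosed, pvOpen, if_neg hy]
    by_cases h1 : pvCell grid i y = true
    · simp only [if_pos h1]
      exact ih hnb' s (length + 1)
    by_cases h2 : length > 0
    swap
    · simp only [if_neg h1, if_neg h2]
      exact ih hnb' s length
    simp only [if_neg h1, if_pos h2]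
    by_cases h3 : s < col.length ∧ length = col.getD s 0
    · -- close a run, matched
      rw [if_pos h3, ih hnb' (s + 1) 0]
      have hs : s < col.length := h3.1
      have hdrop : col.drop s = col.getD s 0 :: col.drop (s + 1) := by
        rw [List.getD_eq_getElem _ _ hs]
        exact (List.drop_eq_getElem_cons hs)
      have hpref : (length :: pvClosed grid i ys 0 <+: col.drop s)
          ↔ (pvClosed grid i ys 0 <+: col.drop (s + 1)) := by
        rw [hdrop, List.cons_prefix_cons]
        simp [h3.2]
      by_cases hp : pvClosed grid i ys 0 <+: col.drop (s + 1)
      · rw [if_pos (hpref.mpr hp), if_pos hp]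
        congr 1
        simp; omega
      · rw [if_neg (fun h => hp (hpref.mp h)), if_neg hp]
    · -- close a run, mismatched: prefix must fail
      rw [if_neg h3, if_neg]
      intro hpf
      apply h3
      have hs : s < col.length := by
        have h := hpf.length_le
        simp at h
        omega
      have hdrop : col.drop s = col.getD s 0 :: col.drop (s + 1) := by
        rw [List.getD_eq_getElem _ _ hs]
        exact (List.drop_eq_getElem_cons hs)
      rw [hdrop, List.cons_prefix_cons] at hpf
      exact ⟨hs, hpf.1⟩

theorem pvColA_eq_pvColB (rows : List Int) (grid : List (List Bool)) (to_x to_y : Int)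
    (i : Nat) (col : List Int)
    (hlen : (if (i : Int) = to_x then min ((max to_y 0).toNat) rows.length else rows.length)
      ≤ (grid.getD i []).length) :
    pvColA rows grid to_x to_y i col = pvColB rows grid to_x to_y i col := by
  have hgetD : ∀ (C t : List Int), (C ++ t).getD C.length 0 = t.getD 0 0 := by
    intro C t
    simp [List.getD_eq_getElem?_getD, List.getElem?_append_right]
  by_cases hfull : (if (i : Int) = to_x then min ((max to_y 0).toNat) rows.length else rows.length) = rows.length
  · -- FULL check: the break never fires
    have hnb : ∀ y ∈ List.range rows.length, ¬ ((i : Int) = to_x ∧ (y : Int) ≥ to_y) := by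
      intro y hy
      rintro ⟨hix, hyty⟩
      rw [if_pos hix] at hfull
      simp only [List.mem_range] at hy
      omega
    have hsplit := pvInnerA_split grid to_x to_y i col (List.range rows.length) [] hnb 0 0
    rw [List.append_nil] at hsplit
    have hO : 0 ≤ pvOpen grid i (List.range rows.length) 0 := pvOpen_nonneg _ _ _ 0 le_rfl
    rw [hfull] at hlen
    simp only [pvColA, pvColB]
    rw [hfull, pvTake_eq_map grid i rows.length hlen]
    simp only [pvScanB_map, List.nil_append, hsplit, List.drop_zero, decide_eq_true_eq, if_pos rfl]
    simp only [pvInnerA]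
    set C := pvClosed grid i (List.range rows.length) 0 with hC
    set O := pvOpen grid i (List.range rows.length) 0 with hOdef
    by_cases hpre : C <+: col
    · obtain ⟨t, rfl⟩ := hpre
      rw [if_pos ⟨t, rfl⟩]
      simp only [Nat.zero_add, hgetD]
      by_cases hOp : O > 0
      · rw [if_pos hOp, if_pos hOp]
        cases t with
        | nil =>
          simp
        | cons a t' =>
          by_cases hOa : O = a
          · subst hOa
            cases t' <;> simp
          · have h1 : O ≠ (a :: t').getD 0 0 := by simpa using hOa
            have h2 : C ++ [O] ≠ C ++ a :: t' := by simp [hOa]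
            simp [h1, h2]
            exact fun h => absurd h hOa
      · rw [if_neg hOp, if_neg hOp]
        have hO0 : O = 0 := by omega
        cases t <;> simp
    · rw [if_neg hpre]
      have hne : (if O > 0 then C ++ [O] else C) ≠ col := by
        split_ifs
        · intro h; exact hpre ⟨[O], h⟩
        · intro h; exact hpre (h ▸ List.prefix_refl _)
      simp [hne]
  · -- PARTIAL check: the break fires at y = n
    have hix : (i : Int) = to_x := by
      by_contra h
      rw [if_neg h] at hfull
      exact hfull rfl
    rw [if_pos hix] at hfull
    set n := (max to_y 0).toNat with hn
    have hlt : n < rows.length := by omega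
    have hnb : ∀ y ∈ List.range n, ¬ ((i : Int) = to_x ∧ (y : Int) ≥ to_y) := by
      intro y hy
      rintro ⟨_, hyty⟩
      simp only [List.mem_range] at hy
      omega
    have hrange : List.range rows.length = List.range n ++ (List.range (rows.length - n)).map (n + ·) := by
      rw [← List.range_add]
      congr 1
      omega
    obtain ⟨k, hk⟩ : ∃ k, rows.length - n = k + 1 := ⟨rows.length - n - 1, by omega⟩
    have hrest : (List.range (rows.length - n)).map (n + ·) = n :: (List.range k).map (fun x => n + (x + 1)) := by
      rw [hk, List.range_succ_eq_map]
      simp [List.map_map, Function.comp]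
    set rest := (List.range k).map (fun x => n + (x + 1)) with hrestdef
    have hO : 0 ≤ pvOpen grid i (List.range n) 0 := pvOpen_nonneg _ _ _ 0 le_rfl
    have hsplit := pvInnerA_split grid to_x to_y i col (List.range n) (n :: rest) hnb 0 0
    have hbreak : ∀ s length, pvInnerA grid to_x to_y i col (n :: rest) s length = some (s, length, false) := by
      intro s length
      have : (i : Int) = to_x ∧ (n : Int) ≥ to_y := ⟨hix, by omega⟩
      simp [pvInnerA, this]
    simp only [pvColA, pvColB]
    rw [if_pos hix]
    have hnL : ¬ (n = rows.length) := by omega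
    have hmin : min n rows.length = n := by omega
    have hsc : List.range rows.length = List.range n ++ (n :: rest) := by rw [hrange, hrest]
    rw [if_pos hix] at hlen
    rw [hmin] at hlen ⊢
    rw [hsc, pvTake_eq_map grid i n hlen]
    simp only [hsplit, pvScanB_map, List.nil_append, if_neg hnL, List.drop_zero, decide_eq_true_eq, decide_eq_false_iff_not]
    set C := pvClosed grid i (List.range n) 0 with hC
    set O := pvOpen grid i (List.range n) 0 with hOdef
    by_cases hpre : C <+: col
    · obtain ⟨t, rfl⟩ := hpre
      rw [if_pos ⟨t, rfl⟩, hbreak]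
      have htake : C = (C ++ t).take C.length := by simp
      rw [if_neg (fun h => h htake)]
      simp only [Nat.zero_add, hgetD]
      by_cases hOp : O > 0
      · rw [if_pos hOp, if_pos hOp]
        by_cases hcond : C.length ≥ (C ++ t).length ∨ O > t.getD 0 0
        · have hc : C.length ≥ (C ++ t).length ∨ (O ≠ t.getD 0 0 ∧ false = true) ∨ (O > t.getD 0 0 ∧ ¬ false = true) := by
            rcases hcond with h | h
            · exact Or.inl h
            · exact Or.inr (Or.inr ⟨h, by simp⟩)
          rw [if_pos hc]
          exact (decide_eq_false (not_not_intro hcond)).symm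
        · push_neg at hcond
          have hc : ¬ (C.length ≥ (C ++ t).length ∨ (O ≠ t.getD 0 0 ∧ false = true) ∨ (O > t.getD 0 0 ∧ ¬ false = true)) := by
            rintro (h | ⟨_, h⟩ | ⟨h, _⟩)
            · omega
            · simp at h
            · omega
          rw [if_neg hc, if_neg (by simp : ¬ (false = true ∧ C.length + 1 ≠ (C ++ t).length))]
          exact (decide_eq_true (by push_neg; exact hcond)).symm
      · rw [if_neg hOp, if_neg hOp]
        simp
    · rw [if_neg hpre]
      have : C ≠ (col.take C.length) := by
        intro h
        exact hpre (List.prefix_iff_eq_take.mpr h)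
      simp [this]

theorem pvOuterA_eq_pvOuterB (rows : List Int) (grid : List (List Bool)) (to_x to_y : Int)
    (cols : List (List Int)) :
    ∀ i : Nat, (∀ j : Nat, i ≤ j → j < i + cols.length → (j : Int) ≤ to_x →
        (if (j : Int) = to_x then min ((max to_y 0).toNat) rows.length else rows.length)
          ≤ (grid.getD j []).length) →
      pvOuterA rows grid to_x to_y i cols = pvOuterB rows grid to_x to_y i cols := by
  induction cols with
  | nil => intro i _; rfl
  | cons col rest ih =>
    intro i H
    simp only [pvOuterA, pvOuterB]
    by_cases hi : (i : Int) > to_x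
    · rw [if_pos hi, if_pos hi]
    · have hle : (i : Int) ≤ to_x := by omega
      rw [if_neg hi, if_neg hi,
        pvColA_eq_pvColB rows grid to_x to_y i col
          (H i le_rfl (by simp only [List.length_cons]; omega) hle),
        ih (i + 1) (fun j h1 h2 h3 =>
          H j (by omega) (by simp only [List.length_cons] at h2 ⊢; omega) h3)]

-- ===== VERDICT (by name: the statement is the Claim_ definition above) =====
theorem partial_check_cols_spec : Claim_equal_partial_check_cols := by
  intro rows cols grid to_x to_y _ hpre
  unfold Spec_partial_check_cols partial_check_cols partial_check_cols_alt
  apply pvOuterA_eq_pvOuterB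
  intro j _ hj hle
  exact (hpre j (by simpa [List.mem_range] using hj) hle).2
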